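-- pv_equiv track=rewrite | github.com/agent0ai/a0-connector | packages/a0-computer-use-windows/src/a0_computer_use_windows/runtime.py | _format_key_sequence
-- ===== SOURCE A (Python) =====
-- from typing import Any, Protocol
--
-- class WindowsComputerUseError(RuntimeError):
--     def __init__(
--         self,
--         code: str,
--         message: str,
--         *,
--         result: dict[str, Any] | None = None,
--     ) -> None:
--         super().__init__(message)
--         self.code = code
--         self.result = result
--
-- def _normalize_key_token(key: str) -> str:
--     aliases = {
--         "alt": "ALT",
--         "ctrl": "CTRL",
--         "control": "CTRL",
--         "delete": "DELETE",
--         "down": "DOWN",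
--         "enter": "ENTER",
--         "esc": "ESC",
--         "escape": "ESC",
--         "left": "LEFT",
--         "pagedown": "PGDN",
--         "pageup": "PGUP",
--         "pgdn": "PGDN",
--         "pgup": "PGUP",
--         "right": "RIGHT",
--         "shift": "SHIFT",
--         "space": "SPACE",
--         "super": "WIN",
--         "tab": "TAB",
--         "up": "UP",
--         "backspace": "BACKSPACE",
--     }
--     cleaned = str(key or "").strip()
--     if not cleaned:
--         return ""
--     if len(cleaned) == 1 and cleaned.isprintable():
--         return cleaned
--     return aliases.get(cleaned.lower(), cleaned.upper())
--
-- def _format_key_sequence(keys: list[str]) -> str: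
--     normalized = [_normalize_key_token(key) for key in keys if _normalize_key_token(key)]
--     if not normalized:
--         raise WindowsComputerUseError("COMPUTER_USE_KEYS_REQUIRED", "key requires a non-empty keys list.")
--     if len(normalized) == 1:
--         token = normalized[0]
--         return token if len(token) == 1 else f"{{{token}}}"
--
--     modifiers = normalized[:-1]
--     body = normalized[-1]
--     prefix = "".join(f"{{{modifier} down}}" for modifier in modifiers)
--     suffix = "".join(f"{{{modifier} up}}" for modifier in reversed(modifiers))
--     if len(body) == 1:
--         return prefix + body + suffix
--     return prefix + f"{{{body}}}" + suffix
-- ===== SOURCE B (Python) =====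
-- from typing import Any
--
--
-- class WindowsComputerUseError(RuntimeError):
--     def __init__(
--         self,
--         code: str,
--         message: str,
--         *,
--         result: dict[str, Any] | None = None,
--     ) -> None:
--         super().__init__(message)
--         self.code = code
--         self.result = result
--
--
-- def _normalize_key_token(key: str) -> str:
--     aliases = {
--         "alt": "ALT",
--         "ctrl": "CTRL",
--         "control": "CTRL",
--         "delete": "DELETE",
--         "down": "DOWN",
--         "enter": "ENTER",
--         "esc": "ESC",
--         "escape": "ESC",
--         "left": "LEFT",
--         "pagedown": "PGDN",
--         "pageup": "PGUP",
--         "pgdn": "PGDN",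
--         "pgup": "PGUP",
--         "right": "RIGHT",
--         "shift": "SHIFT",
--         "space": "SPACE",
--         "super": "WIN",
--         "tab": "TAB",
--         "up": "UP",
--         "backspace": "BACKSPACE",
--     }
--     cleaned = str(key or "").strip()
--     if not cleaned:
--         return ""
--     if len(cleaned) == 1 and cleaned.isprintable():
--         return cleaned
--     return aliases.get(cleaned.lower(), cleaned.upper())
--
--
-- def _format_key_sequence(keys: list[str]) -> str:
--     normalized = [token for token in map(_normalize_key_token, keys) if token]
--     if not normalized:
--         raise WindowsComputerUseError("COMPUTER_USE_KEYS_REQUIRED", "key requires a non-empty keys list.")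
--     *modifiers, body = normalized
--     result = body if len(body) == 1 else f"{{{body}}}"
--     for modifier in reversed(modifiers):
--         result = f"{{{modifier} down}}{result}{{{modifier} up}}"
--     return result
-- ===== Notes on version B (the rewrite author's own statement) =====
-- stated objective: simpler
-- what changed: Replaces the separate single-key branch and the prefix/suffix double join with one unpacking (*modifiers, body) and a single accumulator loop over reversed(modifiers) that wraps the body in '{m down}'/'{m up}' pairs.
import Mathlib
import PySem

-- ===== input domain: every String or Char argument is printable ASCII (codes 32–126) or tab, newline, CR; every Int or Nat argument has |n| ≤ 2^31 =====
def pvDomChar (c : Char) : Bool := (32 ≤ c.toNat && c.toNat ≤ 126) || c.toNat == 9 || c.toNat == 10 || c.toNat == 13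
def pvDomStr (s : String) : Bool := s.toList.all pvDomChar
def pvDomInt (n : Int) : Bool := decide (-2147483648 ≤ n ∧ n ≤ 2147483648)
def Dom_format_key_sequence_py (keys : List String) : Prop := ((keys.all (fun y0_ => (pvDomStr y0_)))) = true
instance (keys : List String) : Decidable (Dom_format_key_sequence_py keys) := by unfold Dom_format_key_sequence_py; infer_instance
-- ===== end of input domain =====

-- B merges A's single-key branch and the prefix/suffix double join into one reversed accumulator
-- loop over the modifiers (simpler decomposition, same cost); A raises where every key strips
-- empty (excluded by Pre_). Return values only; neither program mutates its argument.

-- ===== PORT A =====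
-- the alias table of _normalize_key_token
def pvAliases : PySem.Dict String String := PySem.Dict.ofList
  [("alt", "ALT"), ("ctrl", "CTRL"), ("control", "CTRL"), ("delete", "DELETE"),
   ("down", "DOWN"), ("enter", "ENTER"), ("esc", "ESC"), ("escape", "ESC"),
   ("left", "LEFT"), ("pagedown", "PGDN"), ("pageup", "PGUP"), ("pgdn", "PGDN"),
   ("pgup", "PGUP"), ("right", "RIGHT"), ("shift", "SHIFT"), ("space", "SPACE"),
   ("super", "WIN"), ("tab", "TAB"), ("up", "UP"), ("backspace", "BACKSPACE")]

-- _normalize_key_token (helper shared verbatim by Source A and Source B).  str(key or "").strip() equals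
-- key.strip() for a str argument.  cleaned.isprintable() is ported as 'every char is ASCII 32..126':
-- exact on Dom, since it is only reached on a single stripped (hence non-whitespace) Dom character.
def pyNormKey (key : String) : String :=
  let cleaned := PySem.Str.strip key
  if cleaned = "" then ""
  else if PySem.Str.len cleaned = 1 && cleaned.toList.all (fun c => 32 ≤ c.toNat && c.toNat ≤ 126) then cleaned
  else pvAliases.getD (PySem.Str.lower cleaned) (PySem.Str.upper cleaned)

-- A's code after 'normalized' is computed (on [] Python A raises WindowsComputerUseError,
-- excluded by Pre_; "" stands in)
def pvTailA (normalized : List String) : String :=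
  if normalized = [] then ""
  else if normalized.length = 1 then
    let token := normalized.headD ""                                   -- normalized[0]
    if PySem.Str.len token = 1 then token else "{" ++ token ++ "}"
  else
    let modifiers := PySem.List.slice normalized none (some (-1))      -- normalized[:-1]
    let body := (PySem.List.pyGet? normalized (-1)).getD ""            -- normalized[-1] (nonempty here)
    let prefx := PySem.Str.join "" (modifiers.map (fun m => "{" ++ m ++ " down}"))
    let suffx := PySem.Str.join "" (modifiers.reverse.map (fun m => "{" ++ m ++ " up}"))
    if PySem.Str.len body = 1 then prefx ++ body ++ suffx
    else prefx ++ ("{" ++ body ++ "}") ++ suffx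

def format_key_sequence_py (keys : List String) : String :=
  pvTailA ((keys.filter (fun k => pyNormKey k != "")).map pyNormKey)

-- ===== PORT B =====
-- B's code after 'normalized': *modifiers, body = normalized, then the reversed accumulator loop
-- (on [] Python B raises the same error as A; excluded by Pre_)
def pvTailB (normalized : List String) : String :=
  match normalized.getLast? with
  | none => ""
  | some body =>
    let modifiers := normalized.dropLast
    let start := if PySem.Str.len body = 1 then body else "{" ++ body ++ "}"
    modifiers.reverse.foldl (fun result m => "{" ++ m ++ " down}" ++ result ++ ("{" ++ m ++ " up}")) start

def format_key_sequence_py_alt (keys : List String) : String :=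
  pvTailB ((keys.map pyNormKey).filter (fun t => t != ""))

-- ===== PRECONDITION & SPEC =====
-- Pre_ excludes exactly the inputs on which every key strips to "" (so 'normalized' is empty):
-- there Python A raises WindowsComputerUseError (and Python B raises the same error).
def Pre_format_key_sequence_py (keys : List String) : Prop :=
  keys.any (fun k => PySem.Str.strip k != "") = true
instance (keys : List String) : Decidable (Pre_format_key_sequence_py keys) := by
  unfold Pre_format_key_sequence_py; infer_instance
def pvWitness_format_key_sequence_py : List String := ["ctrl", "c"]

def Spec_format_key_sequence_py (keys : List String) (out : String) : Prop := out = format_key_sequence_py_alt keys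
instance (keys : List String) (out : String) : Decidable (Spec_format_key_sequence_py keys out) := by unfold Spec_format_key_sequence_py; infer_instance

-- ===== CLAIM (what is proved, stated in full; the proofs are below) =====
def Claim_equal_format_key_sequence_py : Prop := ∀ (keys : List String), Dom_format_key_sequence_py keys → Pre_format_key_sequence_py keys → Spec_format_key_sequence_py keys (format_key_sequence_py keys)

-- ===== LEMMAS AND PROOFS =====

-- the two 'normalized' computations produce the same list
theorem pv_normalized_eq (keys : List String) :
    (keys.filter (fun k => pyNormKey k != "")).map pyNormKey
      = (keys.map pyNormKey).filter (fun t => t != "") := by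
  induction keys with
  | nil => rfl
  | cons k ks ih =>
    by_cases h : pyNormKey k = "" <;> simp [h, ih]

theorem pv_join_nil : PySem.Str.join "" ([] : List String) = "" := by decide

theorem pv_join_cons (x : String) (xs : List String) :
    PySem.Str.join "" (x :: xs) = x ++ PySem.Str.join "" xs := by
  apply String.toList_inj.mp
  cases xs with
  | nil => simp [PySem.Chars.join_singleton, PySem.Chars.join_nil]
  | cons y ys => simp [PySem.Chars.join_cons_cons]

theorem pv_join_concat (l : List String) (x : String) :
    PySem.Str.join "" (l ++ [x]) = PySem.Str.join "" l ++ x := by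
  induction l with
  | nil =>
    apply String.toList_inj.mp
    simp [pv_join_cons, pv_join_nil]
  | cons y ys ih =>
    apply String.toList_inj.mp
    simp [pv_join_cons, ih]

-- the accumulator loop equals A's prefix/suffix joins around its start value
theorem pv_fold_eq (ms : List String) (w : String) :
    ms.reverse.foldl (fun result m => "{" ++ m ++ " down}" ++ result ++ ("{" ++ m ++ " up}")) w
      = PySem.Str.join "" (ms.map (fun m => "{" ++ m ++ " down}")) ++ w
          ++ PySem.Str.join "" (ms.reverse.map (fun m => "{" ++ m ++ " up}")) := by
  induction ms generalizing w with
  | nil =>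
    apply String.toList_inj.mp
    simp [pv_join_nil]
  | cons m rest ih =>
    rw [List.reverse_cons, List.foldl_append, ih, List.foldl_cons, List.foldl_nil,
      List.map_cons, pv_join_cons, List.map_append, List.map_cons, List.map_nil, pv_join_concat]
    apply String.toList_inj.mp
    simp

theorem pv_tail_eq (l : List String) : pvTailA l = pvTailB l := by
  rcases l.eq_nil_or_concat with rfl | ⟨ms, body, rfl⟩
  · rfl
  · rw [List.concat_eq_append]
    cases ms with
    | nil => simp [pvTailA, pvTailB]
    | cons m rest =>
      have hne : (m :: rest) ++ [body] ≠ [] := by simp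
      have hlen : ¬ ((m :: rest) ++ [body]).length = 1 := by simp
      simp only [pvTailA, pvTailB, if_neg hne, if_neg hlen, PySem.List.slice_to_neg_one,
        PySem.List.pyGet?_neg_one, List.getLast?_concat, List.dropLast_concat, Option.getD_some]
      rw [pv_fold_eq]
      split_ifs <;> (apply String.toList_inj.mp; simp)

-- ===== VERDICT (by name: the statement is the Claim_ definition above) =====
theorem format_key_sequence_py_spec : Claim_equal_format_key_sequence_py := by
  intro keys _ _
  show format_key_sequence_py keys = format_key_sequence_py_alt keys
  unfold format_key_sequence_py format_key_sequence_py_alt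
  rw [pv_normalized_eq, pv_tail_eq]
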